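-- pv_equiv track=rewrite | github.com/mar2181/antigravity-workflows | blog_writer.py | _parse_md_sections
-- ===== SOURCE A (Python) =====
-- def _parse_md_sections(md_content: str) -> list:
--     """Parse H2 sections from markdown. Returns list of {heading, body}."""
--     # Strip YAML frontmatter
--     if md_content.startswith("---"):
--         end = md_content.find("---", 3)
--         if end != -1:
--             md_content = md_content[end + 3:].strip()
--     sections = []
--     current_heading = None
--     current_body = []
--     for line in md_content.splitlines():
--         if line.startswith("## "):
--             if current_heading:
--                 sections.append({"heading": current_heading, "body": "\n".join(current_body).strip()})
--             current_heading = line[3:].strip()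
--             current_body = []
--         elif not line.startswith("# "):
--             current_body.append(line)
--     if current_heading:
--         sections.append({"heading": current_heading, "body": "\n".join(current_body).strip()})
--     return sections
-- ===== SOURCE B (Python) =====
-- def _parse_md_sections(md_content: str) -> list:
--     """Parse H2 sections from markdown. Returns list of {heading, body}."""
--     if md_content.startswith("---"):
--         end = md_content.find("---", 3)
--         if end != -1:
--             md_content = md_content[end + 3:].strip()
--     lines = md_content.splitlines()
--     n = len(lines)
--     sections = []
--     # segment scan: jump to the first H2 marker, then process one
--     # [marker, next marker) segment at a time
--     i = 0
--     while i < n and not lines[i].startswith("## "):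
--         i += 1
--     while i < n:
--         head = lines[i][3:].strip()
--         j = i + 1
--         while j < n and not lines[j].startswith("## "):
--             j += 1
--         if head:
--             body = [l for l in lines[i + 1:j] if not l.startswith("# ")]
--             sections.append({"heading": head, "body": "\n".join(body).strip()})
--         i = j
--     return sections
-- ===== Notes on version B (the rewrite author's own statement) =====
-- stated objective: alternative
-- what changed: Replaces A's single accumulator scan (mutable current_heading/current_body with a trailing flush) by a segment scan that jumps to each H2 marker, locates the next marker, and builds each section directly from the slice of lines between the two markers.
import Mathlib
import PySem

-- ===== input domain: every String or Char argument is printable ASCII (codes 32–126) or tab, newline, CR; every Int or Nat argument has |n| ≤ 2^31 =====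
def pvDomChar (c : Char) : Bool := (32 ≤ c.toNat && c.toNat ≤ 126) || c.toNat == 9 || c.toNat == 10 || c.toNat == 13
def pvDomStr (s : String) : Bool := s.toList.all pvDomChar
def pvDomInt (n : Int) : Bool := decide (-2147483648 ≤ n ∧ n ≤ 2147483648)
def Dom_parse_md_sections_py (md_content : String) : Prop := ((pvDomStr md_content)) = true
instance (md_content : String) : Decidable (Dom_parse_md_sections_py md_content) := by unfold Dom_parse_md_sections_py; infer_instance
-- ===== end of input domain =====

-- B rebuilds each section from the segment of lines between one H2 marker and the next
-- instead of A's single accumulator scan with a trailing flush; objective: alternative decomposition, same cost.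

-- ===== PORT A =====
-- Python truthiness of an Optional[str]: None and "" are falsy.
def pyTruthyOptStr : Option String → Bool
  | none => false
  | some s => s ≠ ""

-- one iteration of A's for-loop; state = (sections, current_heading, current_body)
def aStep (st : List (List (String × String)) × Option String × List String) (line : String) :
    List (List (String × String)) × Option String × List String :=
  let (sections, current_heading, current_body) := st
  if PySem.Str.startswith line "## " then
    ((if pyTruthyOptStr current_heading then
        sections ++ [[("heading", current_heading.getD ""),
                      ("body", PySem.Str.strip (PySem.Str.join "\n" current_body))]]
      else sections),
     some (PySem.Str.strip (PySem.Str.slice line (some 3) none)), [])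
  else if PySem.Str.startswith line "# " then
    (sections, current_heading, current_body)
  else
    (sections, current_heading, current_body ++ [line])

def parse_md_sections_py (md_content : String) : List (List (String × String)) :=
  let md_content :=
    if PySem.Str.startswith md_content "---" then
      let e := PySem.Str.findFrom md_content "---" 3
      if e ≠ -1 then PySem.Str.strip (PySem.Str.slice md_content (some (e + 3)) none)
      else md_content
    else md_content
  let st := (PySem.Str.splitlines md_content).foldl aStep ([], none, [])
  if pyTruthyOptStr st.2.1 then
    st.1 ++ [[("heading", st.2.1.getD ""),
              ("body", PySem.Str.strip (PySem.Str.join "\n" st.2.2))]]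
  else st.1

-- ===== PORT B =====
def isH2 (l : String) : Bool := PySem.Str.startswith l "## "
def isH1 (l : String) : Bool := PySem.Str.startswith l "# "

-- port of Source B's segment scan: the leading skip loop is the one-line-at-a-time recursion,
-- the inner scan to the next H2 marker is takeWhile/dropWhile, the outer while-loop the tail recursion
def bSections : List String → List (List (String × String))
  | [] => []
  | l :: ls =>
    if isH2 l then
      let head := PySem.Str.strip (PySem.Str.slice l (some 3) none)
      let rest := bSections (ls.dropWhile (fun x => !isH2 x))
      if head ≠ "" then
        [("heading", head),
         ("body", PySem.Str.strip (PySem.Str.join "\n"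
            ((ls.takeWhile (fun x => !isH2 x)).filter (fun x => !isH1 x))))] :: rest
      else rest
    else bSections ls
termination_by ls => ls.length
decreasing_by
  · have := List.length_dropWhile_le (fun x => !isH2 x) ls
    simp; omega
  · simp

def parse_md_sections_py_alt (md_content : String) : List (List (String × String)) :=
  let md_content :=
    if PySem.Str.startswith md_content "---" then
      let e := PySem.Str.findFrom md_content "---" 3
      if e ≠ -1 then PySem.Str.strip (PySem.Str.slice md_content (some (e + 3)) none)
      else md_content
    else md_content
  bSections (PySem.Str.splitlines md_content)

-- ===== PRECONDITION & SPEC =====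
def Spec_parse_md_sections_py (md_content : String) (out : List (List (String × String))) : Prop := out = parse_md_sections_py_alt md_content
instance (md_content : String) (out : List (List (String × String))) : Decidable (Spec_parse_md_sections_py md_content out) := by unfold Spec_parse_md_sections_py; infer_instance

-- ===== CLAIM (what is proved, stated in full; the proofs are below) =====
def Claim_equal_parse_md_sections_py : Prop := ∀ (md_content : String), Dom_parse_md_sections_py md_content → Spec_parse_md_sections_py md_content (parse_md_sections_py md_content)

-- ===== LEMMAS AND PROOFS =====

-- proof helpers
def mkSec (h : String) (b : List String) : List (String × String) :=
  [("heading", h), ("body", PySem.Str.strip (PySem.Str.join "\n" b))]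

def finA (st : List (List (String × String)) × Option String × List String) :
    List (List (String × String)) :=
  if pyTruthyOptStr st.2.1 then st.1 ++ [mkSec (st.2.1.getD "") st.2.2] else st.1

lemma aStep_def (secs : List (List (String × String))) (h : Option String) (b : List String)
    (line : String) :
    aStep (secs, h, b) line =
      if isH2 line then
        ((if pyTruthyOptStr h then secs ++ [mkSec (h.getD "") b] else secs),
         some (PySem.Str.strip (PySem.Str.slice line (some 3) none)), [])
      else if isH1 line then (secs, h, b)
      else (secs, h, b ++ [line]) := rfl

lemma bSections_skip (l : String) (ls : List String) (h : isH2 l = false) :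
    bSections (l :: ls) = bSections ls := by
  rw [bSections]; simp [h]

lemma bSections_cons_h2 (l : String) (ls : List String) (h : isH2 l = true) :
    bSections (l :: ls) =
      (if PySem.Str.strip (PySem.Str.slice l (some 3) none) ≠ "" then
        [mkSec (PySem.Str.strip (PySem.Str.slice l (some 3) none))
          ((ls.takeWhile (fun x => !isH2 x)).filter (fun x => !isH1 x))]
      else []) ++ bSections (ls.dropWhile (fun x => !isH2 x)) := by
  rw [bSections]; simp only [h, if_true, mkSec]
  split_ifs <;> simp

lemma bSections_dropWhile (ls : List String) :
    bSections (ls.dropWhile (fun x => !isH2 x)) = bSections ls := by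
  induction ls with
  | nil => simp
  | cons l ls ih =>
    by_cases h : isH2 l
    · simp [h]
    · rw [List.dropWhile_cons_of_pos (by simp [h]), ih, bSections_skip l ls (by simp [h])]

lemma truthy_some (s : String) : pyTruthyOptStr (some s) = decide (s ≠ "") := rfl

lemma foldl_aStep_prefix (lines : List String) :
    ∀ (secs : List (List (String × String))) (h : Option String) (b : List String),
      lines.foldl aStep (secs, h, b) =
        (secs ++ (lines.foldl aStep ([], h, b)).1, (lines.foldl aStep ([], h, b)).2) := by
  induction lines with
  | nil => intro secs h b; simp
  | cons l ls ih =>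
    intro secs h b
    rw [List.foldl_cons, List.foldl_cons, aStep_def, aStep_def]
    split_ifs with h2 ht h1
    · simp only [List.nil_append]
      rw [ih (secs ++ [mkSec (h.getD "") b]), ih [mkSec (h.getD "") b]]
      simp
    · rw [ih secs]
    · exact ih secs h b
    · exact ih secs h (b ++ [l])

lemma finA_append (secs : List (List (String × String)))
    (st : List (List (String × String)) × Option String × List String) :
    finA (secs ++ st.1, st.2) = secs ++ finA st := by
  unfold finA; split_ifs <;> simp

lemma loop_eq (lines : List String) :
    ∀ (h : Option String) (b : List String),
      finA (lines.foldl aStep ([], h, b)) =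
        if pyTruthyOptStr h then
          mkSec (h.getD "") (b ++ (lines.takeWhile (fun x => !isH2 x)).filter (fun x => !isH1 x))
            :: bSections (lines.dropWhile (fun x => !isH2 x))
        else bSections lines := by
  induction lines with
  | nil =>
    intro h b
    by_cases ht : pyTruthyOptStr h <;> simp [finA, ht, bSections]
  | cons l ls ih =>
    intro h b
    rw [List.foldl_cons, aStep_def]
    by_cases h2 : isH2 l
    · simp only [h2, if_true]
      rw [foldl_aStep_prefix, finA_append, ih,
          List.takeWhile_cons_of_neg (by simp [h2]),
          List.dropWhile_cons_of_neg (by simp [h2]),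
          bSections_cons_h2 l ls h2, ← bSections_dropWhile ls]
      by_cases hn : PySem.Str.strip (PySem.Str.slice l (some 3) none) = "" <;>
        by_cases ht : pyTruthyOptStr h = true <;>
          simp [ht, hn, truthy_some]
    · have h2' : isH2 l = false := by simpa using h2
      by_cases h1 : isH1 l
      · simp only [h2', h1, Bool.false_eq_true, if_false, if_true]
        rw [ih, bSections_skip l ls h2',
            List.takeWhile_cons_of_pos (by simp [h2']),
            List.dropWhile_cons_of_pos (by simp [h2'])]
        by_cases ht : pyTruthyOptStr h = true <;> simp [ht, h1]
      · have h1' : isH1 l = false := by simpa using h1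
        simp only [h2', h1', Bool.false_eq_true, if_false]
        rw [ih, bSections_skip l ls h2',
            List.takeWhile_cons_of_pos (by simp [h2']),
            List.dropWhile_cons_of_pos (by simp [h2'])]
        by_cases ht : pyTruthyOptStr h = true <;> simp [ht, h1']

lemma parse_eq (L : List String) :
    finA (L.foldl aStep ([], none, [])) = bSections L := by
  rw [loop_eq]; simp [pyTruthyOptStr]

-- ===== VERDICT (by name: the statement is the Claim_ definition above) =====
theorem parse_md_sections_py_spec : Claim_equal_parse_md_sections_py := by
  intro md _
  unfold Spec_parse_md_sections_py parse_md_sections_py parse_md_sections_py_alt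
  exact parse_eq _
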